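-- pv_equiv track=rewrite | github.com/erzar0/MC | src/batching.py | batch_n
-- ===== SOURCE A (Python) =====
-- from itertools import islice
-- from typing import Iterable, TypeVar, Generator, List
--
-- T = TypeVar('T')
--
-- def batch_n(iterable: Iterable[T], batch_count: int) -> Generator[List[T], None, None]:
--     """
--     Split an iterable into n batches as evenly as possible.
--
--     Args:
--         iterable: Any iterable of items.
--         n: Number of batches to create.
--
--     Yields:
--         Lists of items (batches).
--     """
--     if batch_count <= 0:
--         raise ValueError("Number of batches must be positive")
--
--     batch_size = len(list(iterable)) // batch_count + 1
--
--     it = iter(iterable)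
--     while True:
--         batch = list(islice(it, batch_size))
--         if not batch:
--             break
--         yield batch
-- ===== SOURCE B (Python) =====
-- def batch_n(iterable, batch_count):
--     """Split an iterable into n batches as evenly as possible."""
--     if batch_count <= 0:
--         raise ValueError("Number of batches must be positive")
--     batch_size = len(list(iterable)) // batch_count + 1
--     batch = []
--     for item in iterable:
--         batch.append(item)
--         if len(batch) == batch_size:
--             yield batch
--             batch = []
--     if batch:
--         yield batch
-- ===== Notes on version B (the rewrite author's own statement) =====
-- stated objective: alternative
-- what changed: Replaces A's while-True loop that cuts fixed-size chunks off an iterator with itertools.islice by a single element-wise pass that grows an accumulator batch and flushes it whenever it reaches batch_size (plus a final flush); no islice or slicing at all.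
import Mathlib
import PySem

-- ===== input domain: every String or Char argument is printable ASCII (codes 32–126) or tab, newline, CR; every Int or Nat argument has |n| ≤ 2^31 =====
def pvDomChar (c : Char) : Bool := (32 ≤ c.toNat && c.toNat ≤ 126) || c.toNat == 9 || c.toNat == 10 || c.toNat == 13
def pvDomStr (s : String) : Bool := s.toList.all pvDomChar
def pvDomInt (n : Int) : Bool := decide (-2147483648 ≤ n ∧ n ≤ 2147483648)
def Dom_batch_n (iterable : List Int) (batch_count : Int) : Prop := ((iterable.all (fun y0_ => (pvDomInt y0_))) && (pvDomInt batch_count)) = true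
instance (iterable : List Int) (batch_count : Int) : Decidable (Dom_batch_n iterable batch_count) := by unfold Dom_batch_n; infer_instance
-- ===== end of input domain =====

-- B replaces A's while-True/islice chunk cutting with a single element-wise pass that
-- grows an accumulator batch and flushes it when it reaches batch_size (alternative decomposition).

-- ===== PORT A =====
-- the 'while True: batch = list(islice(it, batch_size)); if not batch: break; yield batch' loop
def batchNLoop (it : List Int) (bs : Nat) : List (List Int) :=
  if (it.take bs).isEmpty then [] else it.take bs :: batchNLoop (it.drop bs) bs
termination_by it.length
decreasing_by
  rename_i h
  have h1 : bs ≠ 0 ∧ it ≠ [] := by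
    by_contra hc
    apply h
    simp only [List.isEmpty_iff, List.take_eq_nil_iff]
    tauto
  have h2 := List.length_pos_iff.mpr h1.2
  simp only [List.length_drop]
  omega

def batch_n (iterable : List Int) (batch_count : Int) : List (List Int) :=
  if batch_count ≤ 0 then []  -- Python raises ValueError here; excluded by Pre_batch_n
  else
    let batch_size : Int := PySem.Int.floordiv (iterable.length : Int) batch_count + 1
    batchNLoop iterable batch_size.toNat

-- ===== PORT B =====
-- the 'for item in iterable: batch.append(item); if len(batch) == batch_size: yield batch; batch = []'
-- loop, followed by the final 'if batch: yield batch' flush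
def altGo (bs : Int) (batch : List Int) : List Int → List (List Int)
  | [] => if batch.isEmpty then [] else [batch]
  | x :: rest =>
    let b := batch ++ [x]
    if (b.length : Int) = bs then b :: altGo bs [] rest else altGo bs b rest

def batch_n_alt (iterable : List Int) (batch_count : Int) : List (List Int) :=
  if batch_count ≤ 0 then []  -- Python raises ValueError here; excluded by Pre_batch_n
  else
    let batch_size : Int := PySem.Int.floordiv (iterable.length : Int) batch_count + 1
    altGo batch_size [] iterable

-- ===== PRECONDITION & SPEC =====
-- Pre_ excludes exactly batch_count ≤ 0, where Python A raises ValueError.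
def Pre_batch_n (iterable : List Int) (batch_count : Int) : Prop := 0 < batch_count
instance (iterable : List Int) (batch_count : Int) : Decidable (Pre_batch_n iterable batch_count) := by unfold Pre_batch_n; infer_instance
def pvWitness_batch_n : List Int × Int := ([1, 2, 3, 4, 5], 2)

def Spec_batch_n (iterable : List Int) (batch_count : Int) (out : List (List Int)) : Prop := out = batch_n_alt iterable batch_count
instance (iterable : List Int) (batch_count : Int) (out : List (List Int)) : Decidable (Spec_batch_n iterable batch_count out) := by unfold Spec_batch_n; infer_instance

-- ===== CLAIM =====
def Claim_equal_batch_n : Prop := ∀ (iterable : List Int) (batch_count : Int), Dom_batch_n iterable batch_count → Pre_batch_n iterable batch_count → Spec_batch_n iterable batch_count (batch_n iterable batch_count)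

-- ===== LEMMAS AND PROOFS =====

-- the accumulator pass with a partial batch equals chunking the batch's completion
lemma altGo_eq_batchNLoop (bs : Int) (hbs : 0 < bs) :
    ∀ (l batch : List Int), batch.length < bs.toNat →
      altGo bs batch l = batchNLoop (batch ++ l) bs.toNat := by
  intro l
  induction l with
  | nil =>
    intro batch hlt
    simp only [altGo, List.append_nil]
    by_cases hb : batch.isEmpty
    · rw [if_pos hb, batchNLoop]
      simp [List.isEmpty_iff.mp hb]
    · rw [if_neg hb, batchNLoop]
      have hne : batch ≠ [] := by simpa [List.isEmpty_iff] using hb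
      have htake : batch.take bs.toNat = batch := List.take_of_length_le (by omega)
      have hdrop : batch.drop bs.toNat = [] := by
        rw [List.drop_eq_nil_iff]; omega
      rw [if_neg (by simp [htake, hne]), htake, hdrop, batchNLoop]
      simp
  | cons x rest ih =>
    intro batch hlt
    simp only [altGo]
    by_cases hfull : ((batch ++ [x]).length : Int) = bs
    · rw [if_pos hfull]
      have hlen : (batch ++ [x]).length = bs.toNat := by
        simp only [List.length_append, List.length_cons] at hfull ⊢
        omega
      have hrec := ih [] (by simp only [List.length_nil]; omega)
      have hsplit : batch ++ x :: rest = (batch ++ [x]) ++ rest := by simp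
      have htake : ((batch ++ [x]) ++ rest).take bs.toNat = batch ++ [x] := by
        rw [List.take_append_of_le_length (by omega), List.take_of_length_le (by omega)]
      have hdrop : ((batch ++ [x]) ++ rest).drop bs.toNat = rest := by
        rw [← hlen, List.drop_left]
      have hne : ¬ (((batch ++ [x]) ++ rest).take bs.toNat).isEmpty = true := by
        rw [htake]; simp
      rw [hsplit]
      conv_rhs => rw [batchNLoop]
      rw [if_neg hne, htake, hdrop, hrec]
      simp
    · rw [if_neg hfull]
      have hlt' : (batch ++ [x]).length < bs.toNat := by
        have h1 : ((batch ++ [x]).length : Int) ≠ bs := hfull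
        simp only [List.length_append, List.length_cons, List.length_nil] at h1 ⊢
        push_cast at h1
        omega
      have := ih (batch ++ [x]) hlt'
      rw [this]
      congr 1
      simp

-- ===== VERDICT =====
theorem batch_n_spec : Claim_equal_batch_n := by
  intro iterable batch_count _ hpre
  have hp : 0 < batch_count := hpre
  unfold Spec_batch_n batch_n batch_n_alt
  rw [if_neg (by omega : ¬ batch_count ≤ 0), if_neg (by omega : ¬ batch_count ≤ 0)]
  have hbs : 0 < PySem.Int.floordiv (iterable.length : Int) batch_count + 1 := by
    have h := PySem.Int.floordiv_eq_ediv_of_pos (a := (iterable.length : Int)) hp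
    have h2 : 0 ≤ (iterable.length : Int) / batch_count :=
      Int.ediv_nonneg (by positivity) (le_of_lt hp)
    omega
  exact (altGo_eq_batchNLoop _ hbs iterable [] (by simp only [List.length_nil]; omega)).symm
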